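-- pv_equiv track=rewrite | github.com/riffsircar/blend-elites | get_label.py | get_label_mm
-- ===== SOURCE A (Python) =====
-- def get_label_mm(level):
-- 	#label = [False,False,False,False]  # H/T/C, D/|, M, */U/W/w/+/l/L
-- 	label = [False,False,False,False,False]   # clubbed together all decoratives/collectibles, all enemies
-- 	temp = ''
-- 	for l in level:
-- 		temp += ''.join(l)
-- 	if 'H' in temp or 'T' in temp or 'C' in temp:
-- 		label[0] = True
-- 	if 'D' in temp:
-- 		label[1] = True
-- 	if '|' in temp:
-- 		label[2] = True
-- 	if 'M' in temp:
-- 		label[3] = True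
-- 	if '*' in temp or 'U' in temp or 'W' in temp or 'w' in temp or '+' in temp or 'l' in temp or 'L' in temp:
-- 		label[4] = True
-- 	return label
-- ===== SOURCE B (Python) =====
-- _LABEL_IDX = {'H': 0, 'T': 0, 'C': 0,
--               'D': 1,
--               '|': 2,
--               'M': 3,
--               '*': 4, 'U': 4, 'W': 4, 'w': 4, '+': 4, 'l': 4, 'L': 4}
--
-- def get_label_mm(level):
--     label = [False, False, False, False, False]
--     for row in level:
--         for s in row:
--             for ch in s:
--                 i = _LABEL_IDX.get(ch)
--                 if i is not None:
--                     label[i] = True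
--     return label
-- ===== Notes on version B (the rewrite author's own statement) =====
-- stated objective: idiomatic
-- what changed: Replaces the full-string concatenation plus thirteen substring scans with a single per-character pass dispatching through a char-to-label-index dict.
import Mathlib
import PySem

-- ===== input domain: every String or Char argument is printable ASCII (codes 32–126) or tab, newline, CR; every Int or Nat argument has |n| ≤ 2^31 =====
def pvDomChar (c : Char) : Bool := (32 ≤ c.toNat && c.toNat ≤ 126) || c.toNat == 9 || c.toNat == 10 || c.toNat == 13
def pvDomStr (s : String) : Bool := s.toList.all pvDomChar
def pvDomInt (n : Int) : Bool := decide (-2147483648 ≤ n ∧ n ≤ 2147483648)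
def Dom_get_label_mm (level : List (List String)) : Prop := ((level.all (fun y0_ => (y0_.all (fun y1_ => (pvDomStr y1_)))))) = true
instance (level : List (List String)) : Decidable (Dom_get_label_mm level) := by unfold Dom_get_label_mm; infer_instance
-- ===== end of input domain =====

-- B replaces A's string concatenation plus thirteen substring scans by one per-character pass
-- dispatching through a char→label-index dict (objective: idiomatic; same return value, no side effects).

-- ===== PORT A =====
def get_label_mm (level : List (List String)) : List Bool :=
  let label : List Bool := [false, false, false, false, false]
  let temp : String := level.foldl (fun temp l => temp ++ PySem.Str.join "" l) ""
  let label := if PySem.Str.isIn "H" temp || PySem.Str.isIn "T" temp || PySem.Str.isIn "C" temp then label.set 0 true else label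
  let label := if PySem.Str.isIn "D" temp then label.set 1 true else label
  let label := if PySem.Str.isIn "|" temp then label.set 2 true else label
  let label := if PySem.Str.isIn "M" temp then label.set 3 true else label
  let label := if PySem.Str.isIn "*" temp || PySem.Str.isIn "U" temp || PySem.Str.isIn "W" temp || PySem.Str.isIn "w" temp || PySem.Str.isIn "+" temp || PySem.Str.isIn "l" temp || PySem.Str.isIn "L" temp then label.set 4 true else label
  label

-- ===== PORT B =====
-- the module-level dict _LABEL_IDX of Source B
def pvLabelIdx : PySem.Dict Char Int :=
  PySem.Dict.ofList [('H',0),('T',0),('C',0),('D',1),('|',2),('M',3),('*',4),('U',4),('W',4),('w',4),('+',4),('l',4),('L',4)]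

-- the body of Source B's innermost loop: _LABEL_IDX.get(ch); if i is not None: label[i] = True
def pvStep (label : List Bool) (ch : Char) : List Bool :=
  match pvLabelIdx.get? ch with
  | some i => label.set i.toNat true
  | none => label

def get_label_mm_alt (level : List (List String)) : List Bool :=
  level.foldl (fun label row => row.foldl (fun label s => s.toList.foldl pvStep label) label)
    [false, false, false, false, false]

-- ===== PRECONDITION & SPEC =====
def Spec_get_label_mm (level : List (List String)) (out : List Bool) : Prop := out = get_label_mm_alt level
instance (level : List (List String)) (out : List Bool) : Decidable (Spec_get_label_mm level out) := by unfold Spec_get_label_mm; infer_instance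

-- ===== CLAIM (what is proved, stated in full; the proofs are below) =====
def Claim_equal_get_label_mm : Prop := ∀ (level : List (List String)), Dom_get_label_mm level → Spec_get_label_mm level (get_label_mm level)

-- ===== LEMMAS AND PROOFS =====

-- all characters of the level, row by row, string by string
def pvChars (level : List (List String)) : List Char :=
  (level.map (fun row => (row.map String.toList).flatten)).flatten

theorem pvJoin_empty_sep (rows : List (List Char)) : PySem.Chars.join [] rows = rows.flatten := by
  simp only [PySem.Chars.join, List.intercalate]
  induction rows with
  | nil => rfl
  | cons h t ih => cases t <;> simp_all [List.intersperse]

theorem pvToList_temp (level : List (List String)) (t : String) :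
    (level.foldl (fun temp l => temp ++ PySem.Str.join "" l) t).toList = t.toList ++ pvChars level := by
  induction level generalizing t with
  | nil => simp [pvChars]
  | cons row rest ih =>
    rw [List.foldl_cons, ih]
    simp [pvChars, String.toList_append, PySem.Str.toList_join, pvJoin_empty_sep]

theorem pvIsIn_single (c : Char) (s : String) :
    PySem.Str.isIn (String.ofList [c]) s = s.toList.any (fun x => x == c) := by
  rw [List.any_beq', Bool.eq_iff_iff, PySem.Str.isIn_iff_infix]
  simp [List.singleton_infix_iff]

theorem pvAny_or (l : List Char) (p q : Char → Bool) :
    l.any (fun c => p c || q c) = (l.any p || l.any q) := by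
  induction l with
  | nil => rfl
  | cons a t ih => simp [List.any_cons, ih, Bool.or_assoc, Bool.or_left_comm]

theorem pvLabelIdx_items : pvLabelIdx.items = [('H',(0:Int)),('T',0),('C',0),('D',1),('|',2),('M',3),('*',4),('U',4),('W',4),('w',4),('+',4),('l',4),('L',4)] := by decide

theorem get?_pvLabelIdx (c : Char) :
    pvLabelIdx.get? c =
      if c = 'H' then some 0 else if c = 'T' then some 0 else if c = 'C' then some 0 else
      if c = 'D' then some 1 else if c = '|' then some 2 else if c = 'M' then some 3 else
      if c = '*' then some 4 else if c = 'U' then some 4 else if c = 'W' then some 4 else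
      if c = 'w' then some 4 else if c = '+' then some 4 else if c = 'l' then some 4 else
      if c = 'L' then some 4 else none := by
  rw [show pvLabelIdx.get? c = Option.map (fun p => p.2) (List.find? (fun p => p.1 == c) pvLabelIdx.items) from rfl, pvLabelIdx_items]
  simp only [List.find?_cons, List.find?_nil]
  by_cases g0 : c = 'H'
  · subst g0; decide
  by_cases g1 : c = 'T'
  · subst g1; decide
  by_cases g2 : c = 'C'
  · subst g2; decide
  by_cases g3 : c = 'D'
  · subst g3; decide
  by_cases g4 : c = '|'
  · subst g4; decide
  by_cases g5 : c = 'M'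
  · subst g5; decide
  by_cases g6 : c = '*'
  · subst g6; decide
  by_cases g7 : c = 'U'
  · subst g7; decide
  by_cases g8 : c = 'W'
  · subst g8; decide
  by_cases g9 : c = 'w'
  · subst g9; decide
  by_cases g10 : c = '+'
  · subst g10; decide
  by_cases g11 : c = 'l'
  · subst g11; decide
  by_cases g12 : c = 'L'
  · subst g12; decide
  have e0 : ('H' == c) = false := beq_eq_false_iff_ne.mpr (Ne.symm g0)
  have e1 : ('T' == c) = false := beq_eq_false_iff_ne.mpr (Ne.symm g1)
  have e2 : ('C' == c) = false := beq_eq_false_iff_ne.mpr (Ne.symm g2)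
  have e3 : ('D' == c) = false := beq_eq_false_iff_ne.mpr (Ne.symm g3)
  have e4 : ('|' == c) = false := beq_eq_false_iff_ne.mpr (Ne.symm g4)
  have e5 : ('M' == c) = false := beq_eq_false_iff_ne.mpr (Ne.symm g5)
  have e6 : ('*' == c) = false := beq_eq_false_iff_ne.mpr (Ne.symm g6)
  have e7 : ('U' == c) = false := beq_eq_false_iff_ne.mpr (Ne.symm g7)
  have e8 : ('W' == c) = false := beq_eq_false_iff_ne.mpr (Ne.symm g8)
  have e9 : ('w' == c) = false := beq_eq_false_iff_ne.mpr (Ne.symm g9)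
  have e10 : ('+' == c) = false := beq_eq_false_iff_ne.mpr (Ne.symm g10)
  have e11 : ('l' == c) = false := beq_eq_false_iff_ne.mpr (Ne.symm g11)
  have e12 : ('L' == c) = false := beq_eq_false_iff_ne.mpr (Ne.symm g12)
  simp only [Option.map_none, e0, e1, e2, e3, e4, e5, e6, e7, e8, e9, e10, e11, e12, if_neg g0, if_neg g1, if_neg g2, if_neg g3, if_neg g4, if_neg g5, if_neg g6, if_neg g7, if_neg g8, if_neg g9, if_neg g10, if_neg g11, if_neg g12]

theorem pvStep_eq (b0 b1 b2 b3 b4 : Bool) (c : Char) :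
    pvStep [b0,b1,b2,b3,b4] c =
      [b0 || (c == 'H' || c == 'T' || c == 'C'), b1 || (c == 'D'), b2 || (c == '|'), b3 || (c == 'M'),
       b4 || (c == '*' || c == 'U' || c == 'W' || c == 'w' || c == '+' || c == 'l' || c == 'L')] := by
  by_cases h0 : c = 'H'
  · subst h0; simp [pvStep, get?_pvLabelIdx]
  by_cases h1 : c = 'T'
  · subst h1; simp [pvStep, get?_pvLabelIdx]
  by_cases h2 : c = 'C'
  · subst h2; simp [pvStep, get?_pvLabelIdx]
  by_cases h3 : c = 'D'
  · subst h3; simp [pvStep, get?_pvLabelIdx]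
  by_cases h4 : c = '|'
  · subst h4; simp [pvStep, get?_pvLabelIdx]
  by_cases h5 : c = 'M'
  · subst h5; simp [pvStep, get?_pvLabelIdx]
  by_cases h6 : c = '*'
  · subst h6; simp [pvStep, get?_pvLabelIdx]
  by_cases h7 : c = 'U'
  · subst h7; simp [pvStep, get?_pvLabelIdx]
  by_cases h8 : c = 'W'
  · subst h8; simp [pvStep, get?_pvLabelIdx]
  by_cases h9 : c = 'w'
  · subst h9; simp [pvStep, get?_pvLabelIdx]
  by_cases h10 : c = '+'
  · subst h10; simp [pvStep, get?_pvLabelIdx]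
  by_cases h11 : c = 'l'
  · subst h11; simp [pvStep, get?_pvLabelIdx]
  by_cases h12 : c = 'L'
  · subst h12; simp [pvStep, get?_pvLabelIdx]
  have f0 : (c == 'H') = false := beq_eq_false_iff_ne.mpr h0
  have f1 : (c == 'T') = false := beq_eq_false_iff_ne.mpr h1
  have f2 : (c == 'C') = false := beq_eq_false_iff_ne.mpr h2
  have f3 : (c == 'D') = false := beq_eq_false_iff_ne.mpr h3
  have f4 : (c == '|') = false := beq_eq_false_iff_ne.mpr h4
  have f5 : (c == 'M') = false := beq_eq_false_iff_ne.mpr h5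
  have f6 : (c == '*') = false := beq_eq_false_iff_ne.mpr h6
  have f7 : (c == 'U') = false := beq_eq_false_iff_ne.mpr h7
  have f8 : (c == 'W') = false := beq_eq_false_iff_ne.mpr h8
  have f9 : (c == 'w') = false := beq_eq_false_iff_ne.mpr h9
  have f10 : (c == '+') = false := beq_eq_false_iff_ne.mpr h10
  have f11 : (c == 'l') = false := beq_eq_false_iff_ne.mpr h11
  have f12 : (c == 'L') = false := beq_eq_false_iff_ne.mpr h12
  simp only [pvStep, get?_pvLabelIdx, if_neg h0, if_neg h1, if_neg h2, if_neg h3, if_neg h4, if_neg h5, if_neg h6, if_neg h7, if_neg h8, if_neg h9, if_neg h10, if_neg h11, if_neg h12, f0, f1, f2, f3, f4, f5, f6, f7, f8, f9, f10, f11, f12, Bool.or_false]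

theorem pvFold_step (cs : List Char) (b0 b1 b2 b3 b4 : Bool) :
    cs.foldl pvStep [b0,b1,b2,b3,b4] =
      [b0 || cs.any (fun c => c == 'H' || c == 'T' || c == 'C'),
       b1 || cs.any (fun c => c == 'D'),
       b2 || cs.any (fun c => c == '|'),
       b3 || cs.any (fun c => c == 'M'),
       b4 || cs.any (fun c => c == '*' || c == 'U' || c == 'W' || c == 'w' || c == '+' || c == 'l' || c == 'L')] := by
  induction cs generalizing b0 b1 b2 b3 b4 with
  | nil => simp
  | cons c cs ih =>
    rw [List.foldl_cons, pvStep_eq, ih]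
    simp [Bool.or_assoc]

theorem pvAlt_eq (level : List (List String)) :
    get_label_mm_alt level = (pvChars level).foldl pvStep [false,false,false,false,false] := by
  simp [get_label_mm_alt, pvChars, List.foldl_flatten, List.foldl_map]

theorem pvA_eq (level : List (List String)) :
    get_label_mm level =
      [(pvChars level).any (fun c => c == 'H' || c == 'T' || c == 'C'),
       (pvChars level).any (fun c => c == 'D'),
       (pvChars level).any (fun c => c == '|'),
       (pvChars level).any (fun c => c == 'M'),
       (pvChars level).any (fun c => c == '*' || c == 'U' || c == 'W' || c == 'w' || c == '+' || c == 'l' || c == 'L')] := by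
  have hc : ∀ c : Char, PySem.Str.isIn (String.ofList [c]) (level.foldl (fun temp l => temp ++ PySem.Str.join "" l) "") = (pvChars level).any (fun x => x == c) := by
    intro c
    rw [pvIsIn_single, pvToList_temp]
    rfl
  show (let label : List Bool := [false, false, false, false, false]
        let temp : String := level.foldl (fun temp l => temp ++ PySem.Str.join "" l) ""
        let label := if PySem.Str.isIn "H" temp || PySem.Str.isIn "T" temp || PySem.Str.isIn "C" temp then label.set 0 true else label
        let label := if PySem.Str.isIn "D" temp then label.set 1 true else label
        let label := if PySem.Str.isIn "|" temp then label.set 2 true else label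
        let label := if PySem.Str.isIn "M" temp then label.set 3 true else label
        let label := if PySem.Str.isIn "*" temp || PySem.Str.isIn "U" temp || PySem.Str.isIn "W" temp || PySem.Str.isIn "w" temp || PySem.Str.isIn "+" temp || PySem.Str.isIn "l" temp || PySem.Str.isIn "L" temp then label.set 4 true else label
        label) = _
  simp only [hc, pvAny_or]
  split_ifs <;> simp_all [List.forall_mem_ne']

-- ===== VERDICT (by name: the statement is the Claim_ definition above) =====
theorem get_label_mm_spec : Claim_equal_get_label_mm := by
  intro level _
  unfold Spec_get_label_mm
  rw [pvA_eq, pvAlt_eq, pvFold_step]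
  simp
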